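-- pv_equiv track=rewrite | github.com/michaeltaranik/algos | midterm.py | increasing_or_decreasing
-- ===== SOURCE A (Python) =====
-- def increasing_or_decreasing(A):
--     flat = 0
--     increasing = 0
--     decreasing = 0
--     previous_flat = 0
--     previous_increasing = 0
--     previous_decreasing = 0
--     for i in range(1, len(A)):
--         if A[i] > A[i - 1]:
--             increasing += 1
--             flat = 0
--             decreasing = 0
--         elif A[i] < A[i - 1]:
--             increasing = 0
--             flat = 0
--             decreasing += 1
--         else:
--             increasing = 0
--             flat += 1
--             decreasing = 0
--         previous_increasing = increasing if increasing > previous_increasing else previous_increasing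
--         previous_decreasing = decreasing if decreasing > previous_decreasing else previous_decreasing
--         previous_flat = flat if flat > previous_flat else previous_flat
--     if previous_increasing == previous_decreasing != 0:
--         return "equal"
--     elif previous_increasing > previous_flat and previous_increasing > previous_decreasing:
--         return "increasing"
--     elif previous_decreasing > previous_flat and previous_decreasing > previous_increasing:
--         return "decreasing"
--     else:
--         return "flat"
-- ===== SOURCE B (Python) =====
-- from itertools import groupby
--
-- def increasing_or_decreasing(A):
--     signs = [(1 if A[i] > A[i - 1] else -1 if A[i] < A[i - 1] else 0)
--              for i in range(1, len(A))]
--     runs = [(k, sum(1 for _ in g)) for k, g in groupby(signs)]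
--     max_inc = max((n for k, n in runs if k == 1), default=0)
--     max_dec = max((n for k, n in runs if k == -1), default=0)
--     max_flat = max((n for k, n in runs if k == 0), default=0)
--     if max_inc == max_dec != 0:
--         return "equal"
--     elif max_inc > max_flat and max_inc > max_dec:
--         return "increasing"
--     elif max_dec > max_flat and max_dec > max_inc:
--         return "decreasing"
--     else:
--         return "flat"
-- ===== Notes on version B (the rewrite author's own statement) =====
-- stated objective: alternative
-- what changed: Replaces A's six-counter single loop (three current-run and three best-so-far counters updated per step) by a two-phase decomposition: build the list of adjacent-pair comparison signs, run-length-group consecutive equal signs (itertools.groupby), and take the maximum run length per sign before applying the same classification block.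
import Mathlib
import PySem

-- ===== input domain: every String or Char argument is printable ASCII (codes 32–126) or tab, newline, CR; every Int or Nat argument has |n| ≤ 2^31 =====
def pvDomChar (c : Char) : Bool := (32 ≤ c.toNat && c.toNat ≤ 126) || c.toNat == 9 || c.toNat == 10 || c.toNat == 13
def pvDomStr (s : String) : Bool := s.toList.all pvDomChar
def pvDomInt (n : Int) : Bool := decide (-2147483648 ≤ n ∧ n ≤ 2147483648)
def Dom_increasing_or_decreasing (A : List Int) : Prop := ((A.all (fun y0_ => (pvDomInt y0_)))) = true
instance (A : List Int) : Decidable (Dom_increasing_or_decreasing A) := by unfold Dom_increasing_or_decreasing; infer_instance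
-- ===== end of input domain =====

-- B replaces A's six-counter loop by a signs list + run-length grouping pass ('alternative' decomposition, same cost).

-- ===== PORT A =====
def increasing_or_decreasing (A : List Int) : String :=
  let r := (PySem.List.pyRange 1 (A.length : Int) 1).foldl
    (fun (st : Int × Int × Int × Int × Int × Int) i =>
      let flat := st.1
      let increasing := st.2.1
      let decreasing := st.2.2.1
      let previous_flat := st.2.2.2.1
      let previous_increasing := st.2.2.2.2.1
      let previous_decreasing := st.2.2.2.2.2
      let t : Int × Int × Int :=
        if PySem.List.pyGetD A i 0 > PySem.List.pyGetD A (i - 1) 0 then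
          (0, increasing + 1, 0)
        else if PySem.List.pyGetD A i 0 < PySem.List.pyGetD A (i - 1) 0 then
          (0, 0, decreasing + 1)
        else (flat + 1, 0, 0)
      let flat := t.1
      let increasing := t.2.1
      let decreasing := t.2.2
      let previous_increasing := if increasing > previous_increasing then increasing else previous_increasing
      let previous_decreasing := if decreasing > previous_decreasing then decreasing else previous_decreasing
      let previous_flat := if flat > previous_flat then flat else previous_flat
      (flat, increasing, decreasing, previous_flat, previous_increasing, previous_decreasing))
    (0, 0, 0, 0, 0, 0)
  let previous_flat := r.2.2.2.1
  let previous_increasing := r.2.2.2.2.1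
  let previous_decreasing := r.2.2.2.2.2
  if previous_increasing = previous_decreasing ∧ previous_decreasing ≠ 0 then "equal"
  else if previous_increasing > previous_flat ∧ previous_increasing > previous_decreasing then "increasing"
  else if previous_decreasing > previous_flat ∧ previous_decreasing > previous_increasing then "decreasing"
  else "flat"

-- ===== PORT B =====
-- sign of an adjacent pair: 1 if b > a else -1 if b < a else 0
def pvSign (a b : Int) : Int := if b > a then 1 else if b < a then -1 else 0

-- itertools.groupby over equal consecutive signs, with run lengths (streaming accumulator)
def pvRleGo (x : Int) (n : Int) : List Int → List (Int × Int)
  | [] => [(x, n)]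
  | y :: s => if y = x then pvRleGo x (n + 1) s else (x, n) :: pvRleGo y 1 s

def pvRle : List Int → List (Int × Int)
  | [] => []
  | x :: s => pvRleGo x 1 s

-- max((n for k, n in runs if k == v), default=0); run lengths are ≥ 1, so the 0 floor is the default
def pvMaxRun (v : Int) : List (Int × Int) → Int
  | [] => 0
  | (k, n) :: t => if k = v then max n (pvMaxRun v t) else pvMaxRun v t

def increasing_or_decreasing_alt (A : List Int) : String :=
  let signs := (A.zip (PySem.List.slice A (some 1) none)).map (fun p => pvSign p.1 p.2)
  let runs := pvRle signs
  let max_inc := pvMaxRun 1 runs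
  let max_dec := pvMaxRun (-1) runs
  let max_flat := pvMaxRun 0 runs
  if max_inc = max_dec ∧ max_dec ≠ 0 then "equal"
  else if max_inc > max_flat ∧ max_inc > max_dec then "increasing"
  else if max_dec > max_flat ∧ max_dec > max_inc then "decreasing"
  else "flat"

-- ===== PRECONDITION & SPEC =====
def Spec_increasing_or_decreasing (A : List Int) (out : String) : Prop := out = increasing_or_decreasing_alt A
instance (A : List Int) (out : String) : Decidable (Spec_increasing_or_decreasing A out) := by unfold Spec_increasing_or_decreasing; infer_instance

-- ===== CLAIM (what is proved, stated in full; the proofs are below) =====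
def Claim_equal_increasing_or_decreasing : Prop := ∀ (A : List Int), Dom_increasing_or_decreasing A → Spec_increasing_or_decreasing A (increasing_or_decreasing A)

-- ===== LEMMAS AND PROOFS =====

-- spec: gmax v c s = length of the longest run of v in v^c ++ s (c = length of the current open run)
def gmax (v c : Int) : List Int → Int
  | [] => c
  | x :: t => if x = v then gmax v (c + 1) t else max c (gmax v 0 t)

-- trailing open-run length of v after s, starting from an open run of length c
def trailRun (v c : Int) : List Int → Int
  | [] => c
  | x :: t => trailRun v (if x = v then c + 1 else 0) t

lemma le_gmax (v : Int) : ∀ (s : List Int) (c : Int), c ≤ gmax v c s := by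
  intro s
  induction s with
  | nil => intro c; simp [gmax]
  | cons x t ih =>
    intro c
    simp only [gmax]
    split
    · exact le_trans (by omega) (ih (c + 1))
    · exact le_max_left _ _

lemma gmax_nonneg (v : Int) (s : List Int) {c : Int} (hc : 0 ≤ c) : 0 ≤ gmax v c s :=
  le_trans hc (le_gmax v s c)

-- A's loop step, on the sign of the pair
def pvStep (st : Int × Int × Int × Int × Int × Int) (v : Int) :
    Int × Int × Int × Int × Int × Int :=
  let flat := st.1
  let increasing := st.2.1
  let decreasing := st.2.2.1
  let previous_flat := st.2.2.2.1
  let previous_increasing := st.2.2.2.2.1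
  let previous_decreasing := st.2.2.2.2.2
  let t : Int × Int × Int :=
    if v = 1 then (0, increasing + 1, 0)
    else if v = -1 then (0, 0, decreasing + 1)
    else (flat + 1, 0, 0)
  let flat := t.1
  let increasing := t.2.1
  let decreasing := t.2.2
  let previous_increasing := if increasing > previous_increasing then increasing else previous_increasing
  let previous_decreasing := if decreasing > previous_decreasing then decreasing else previous_decreasing
  let previous_flat := if flat > previous_flat then flat else previous_flat
  (flat, increasing, decreasing, previous_flat, previous_increasing, previous_decreasing)

-- the loop invariant of A, phrased over the signs list
lemma foldl_pvStep (s : List Int) (hmem : ∀ y ∈ s, y = 1 ∨ y = -1 ∨ y = 0) :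
    ∀ f i d pf pi pd : Int, 0 ≤ f → 0 ≤ i → 0 ≤ d → f ≤ pf → i ≤ pi → d ≤ pd →
    s.foldl pvStep (f, i, d, pf, pi, pd) =
      (trailRun 0 f s, trailRun 1 i s, trailRun (-1) d s,
       max pf (gmax 0 f s), max pi (gmax 1 i s), max pd (gmax (-1) d s)) := by
  induction s with
  | nil =>
    intro f i d pf pi pd hf hi hd hpf hpi hpd
    simp [trailRun, gmax, max_eq_left hpf, max_eq_left hpi, max_eq_left hpd]
  | cons x t ih =>
    have hmt : ∀ y ∈ t, y = 1 ∨ y = -1 ∨ y = 0 := fun y hy => hmem y (List.mem_cons_of_mem _ hy)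
    have hx := hmem x List.mem_cons_self
    have ih := ih hmt
    intro f i d pf pi pd hf hi hd hpf hpi hpd
    rcases eq_or_ne x 1 with h1 | h1
    · subst h1
      have hstep : pvStep (f, i, d, pf, pi, pd) (1 : Int)
          = (0, i + 1, 0, pf, max pi (i + 1), pd) := by
        simp [pvStep, max_def]
        constructor
        · omega
        · constructor
          · split <;> omega
          · omega
      rw [List.foldl_cons, hstep,
        ih 0 (i + 1) 0 pf (max pi (i + 1)) pd (by omega) (by omega) (by omega)
          (by omega) (le_max_right _ _) (by omega)]
      simp only [trailRun, gmax]
      norm_num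
      refine ⟨?_, ?_, ?_⟩
      · have := gmax_nonneg 0 t (le_refl (0:Int)); omega
      · have := le_gmax 1 t (i + 1); omega
      · have := gmax_nonneg (-1) t (le_refl (0:Int)); omega
    · rcases eq_or_ne x (-1) with h2 | h2
      · subst h2
        have hstep : pvStep (f, i, d, pf, pi, pd) (-1 : Int)
            = (0, 0, d + 1, pf, pi, max pd (d + 1)) := by
          simp [pvStep, max_def]
          constructor
          · omega
          · constructor
            · omega
            · split <;> omega
        rw [List.foldl_cons, hstep,
          ih 0 0 (d + 1) pf pi (max pd (d + 1)) (by omega) (by omega) (by omega)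
            (by omega) (by omega) (le_max_right _ _)]
        simp only [trailRun, gmax]
        norm_num
        refine ⟨?_, ?_, ?_⟩
        · have := gmax_nonneg 0 t (le_refl (0:Int)); omega
        · have := gmax_nonneg 1 t (le_refl (0:Int)); omega
        · have := le_gmax (-1) t (d + 1); omega
      · have h0 : x = 0 := by rcases hx with h | h | h <;> simp_all
        subst h0
        have hstep : pvStep (f, i, d, pf, pi, pd) (0 : Int)
            = (f + 1, 0, 0, max pf (f + 1), pi, pd) := by
          simp [pvStep, max_def]
          constructor
          · split <;> omega
          · omega
        rw [List.foldl_cons, hstep,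
          ih (f + 1) 0 0 (max pf (f + 1)) pi pd (by omega) (by omega) (by omega)
            (le_max_right _ _) (by omega) (by omega)]
        simp only [trailRun, gmax]
        norm_num
        refine ⟨?_, ?_, ?_⟩
        · have := le_gmax 0 t (f + 1); omega
        · have := gmax_nonneg 1 t (le_refl (0:Int)); omega
        · have := gmax_nonneg (-1) t (le_refl (0:Int)); omega

-- B's grouped maxima compute the same gmax
lemma pvMaxRun_rleGo (v : Int) :
    ∀ (s : List Int) (x n : Int), 0 ≤ n →
      pvMaxRun v (pvRleGo x n s) = if x = v then gmax v n s else gmax v 0 s := by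
  intro s
  induction s with
  | nil =>
    intro x n hn
    by_cases h : x = v <;> simp [pvRleGo, pvMaxRun, gmax, h]
    omega
  | cons y t ih =>
    intro x n hn
    by_cases hyx : y = x
    · subst hyx
      simp only [pvRleGo, if_true]
      rw [ih y (n + 1) (by omega)]
      by_cases h : y = v
      · simp [h, gmax]
      · have h0 := gmax_nonneg v t (le_refl (0 : Int))
        simp [h, gmax]
        omega
    · simp only [pvRleGo, if_neg hyx, pvMaxRun]
      rw [ih y 1 (by omega)]
      by_cases hxv : x = v
      · have hyv : ¬ y = v := fun h => hyx (h.trans hxv.symm)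
        simp [hxv, hyv, gmax]
      · have h0 := gmax_nonneg v t (le_refl (0 : Int))
        by_cases hyv : y = v
        · simp [hxv, hyv, gmax]
        · simp [hxv, hyv, gmax]
          omega

lemma pvMaxRun_rle (v : Int) (s : List Int) : pvMaxRun v (pvRle s) = gmax v 0 s := by
  cases s with
  | nil => simp [pvRle, pvMaxRun, gmax]
  | cons x t =>
    simp only [pvRle]
    rw [pvMaxRun_rleGo v t x 1 (by omega)]
    have h0 := gmax_nonneg v t (le_refl (0 : Int))
    by_cases h : x = v
    · simp [gmax, h]
    · simp [gmax, h]
      omega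

-- the index loop of A reads exactly the adjacent pairs of A
lemma map_pyRange_signs (A : List Int) :
    (PySem.List.pyRange 1 (A.length : Int) 1).map
      (fun i => pvSign (PySem.List.pyGetD A (i - 1) 0) (PySem.List.pyGetD A i 0))
    = (A.zip A.tail).map (fun p => pvSign p.1 p.2) := by
  apply List.ext_getElem
  · simp [PySem.List.length_pyRange_one]
  · intro k h1 h2
    have hk : k + 1 < A.length := by
      simp [PySem.List.length_pyRange_one] at h1
      omega
    simp only [List.getElem_map, PySem.List.getElem_pyRange_one, List.getElem_zip]
    have e1 : (1 : Int) + (k : Int) - 1 = ((k : Nat) : Int) := by omega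
    have e2 : (1 : Int) + (k : Int) = (((k + 1) : Nat) : Int) := by omega
    rw [e1, e2, PySem.List.pyGetD_natCast, PySem.List.pyGetD_natCast]
    congr 1
    · exact List.getD_eq_getElem A 0 (by omega)
    · rw [List.getD_eq_getElem A 0 hk]
      simp [List.getElem_tail]

-- ===== VERDICT (by name: the statement is the Claim_ definition above) =====
theorem increasing_or_decreasing_spec : Claim_equal_increasing_or_decreasing := by
  intro A _
  unfold Spec_increasing_or_decreasing increasing_or_decreasing increasing_or_decreasing_alt
  have hbody : (fun (st : Int × Int × Int × Int × Int × Int) (i : Int) =>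
      let flat := st.1
      let increasing := st.2.1
      let decreasing := st.2.2.1
      let previous_flat := st.2.2.2.1
      let previous_increasing := st.2.2.2.2.1
      let previous_decreasing := st.2.2.2.2.2
      let t : Int × Int × Int :=
        if PySem.List.pyGetD A i 0 > PySem.List.pyGetD A (i - 1) 0 then
          (0, increasing + 1, 0)
        else if PySem.List.pyGetD A i 0 < PySem.List.pyGetD A (i - 1) 0 then
          (0, 0, decreasing + 1)
        else (flat + 1, 0, 0)
      let flat := t.1
      let increasing := t.2.1
      let decreasing := t.2.2
      let previous_increasing := if increasing > previous_increasing then increasing else previous_increasing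
      let previous_decreasing := if decreasing > previous_decreasing then decreasing else previous_decreasing
      let previous_flat := if flat > previous_flat then flat else previous_flat
      (flat, increasing, decreasing, previous_flat, previous_increasing, previous_decreasing))
    = (fun st i => pvStep st (pvSign (PySem.List.pyGetD A (i - 1) 0) (PySem.List.pyGetD A i 0))) := by
    funext st i
    rcases lt_trichotomy (PySem.List.pyGetD A (i - 1) 0) (PySem.List.pyGetD A i 0) with h | h | h
    · simp [pvStep, pvSign, h]
    · simp [pvStep, pvSign, h]
    · simp [pvStep, pvSign, h, lt_asymm h]
  rw [hbody, ← List.foldl_map, map_pyRange_signs A, PySem.List.slice_from_one]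
  set s := (A.zip A.tail).map (fun p => pvSign p.1 p.2) with hs
  have hmemS : ∀ y ∈ s, y = 1 ∨ y = -1 ∨ y = 0 := by
    intro y hy
    rw [hs] at hy
    simp only [List.mem_map] at hy
    obtain ⟨p, _, rfl⟩ := hy
    unfold pvSign
    split_ifs <;> simp
  rw [foldl_pvStep s hmemS 0 0 0 0 0 0 (le_refl _) (le_refl _) (le_refl _) (le_refl _) (le_refl _) (le_refl _)]
  have e0 : max (0 : Int) (gmax 0 0 s) = gmax 0 0 s := max_eq_right (gmax_nonneg 0 s (le_refl _))
  have e1 : max (0 : Int) (gmax 1 0 s) = gmax 1 0 s := max_eq_right (gmax_nonneg 1 s (le_refl _))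
  have e2 : max (0 : Int) (gmax (-1) 0 s) = gmax (-1) 0 s := max_eq_right (gmax_nonneg (-1) s (le_refl _))
  simp only [pvMaxRun_rle, e0, e1, e2]
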